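-- pv_equiv track=rewrite | github.com/Thedduro/Algorithm | codetree/벽이 있는 충돌 실험/sol.py | check
-- ===== SOURCE A (Python) =====
-- def check(moved, N):
--     # 2D 배열로 충돌 카운트
--     count = [[0] * N for _ in range(N)]
--
--     # 충돌 카운트
--     for x, y, d in moved:
--         count[x][y] += 1
--
--     new_marbles = []
--
--     for x, y, d in moved:
--         if count[x][y] == 1:   # 단 하나만 있으면 생존
--             new_marbles.append((x, y, d))
--
--     return new_marbles
-- ===== SOURCE B (Python) =====
-- def check(moved, N):
--     # Repeatedly take the first pending marble, split the rest into marbles sharing its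
--     # cell and the others; the marble survives iff nothing shares its cell, and the whole
--     # cell-group is removed from further consideration either way.
--     survivors = []
--     pending = moved
--     while pending:
--         (x, y, d), rest = pending[0], pending[1:]
--         alone = True
--         others = []
--         for m in rest:
--             if (m[0], m[1]) == (x, y):
--                 alone = False
--             else:
--                 others.append(m)
--         if alone:
--             survivors.append((x, y, d))
--         pending = others
--     return survivors
-- ===== Notes on version B (the rewrite author's own statement) =====
-- stated objective: alternative
-- what changed: B replaces A's N x N count matrix plus a second scan of `moved` with a worklist loop that repeatedly splits the pending marbles on the first marble's cell: the head survives iff no other pending marble shares its cell, and the whole cell group is discarded either way, so no N-sized grid is ever allocated.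
-- intended difference: On inputs where some marble is alone at its literal coordinates while a marble with different coordinates (congruent mod N) lands on the same count-grid cell through Python's negative list indexing, A drops that marble and B keeps it; coordinates are cell labels, so B's literal-cell grouping is the intended behaviour. — e.g. on check([(-1, 0, 1), (1, 0, 2)], 2): A returns [], B returns [(-1, 0, 1), (1, 0, 2)]
import Mathlib
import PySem

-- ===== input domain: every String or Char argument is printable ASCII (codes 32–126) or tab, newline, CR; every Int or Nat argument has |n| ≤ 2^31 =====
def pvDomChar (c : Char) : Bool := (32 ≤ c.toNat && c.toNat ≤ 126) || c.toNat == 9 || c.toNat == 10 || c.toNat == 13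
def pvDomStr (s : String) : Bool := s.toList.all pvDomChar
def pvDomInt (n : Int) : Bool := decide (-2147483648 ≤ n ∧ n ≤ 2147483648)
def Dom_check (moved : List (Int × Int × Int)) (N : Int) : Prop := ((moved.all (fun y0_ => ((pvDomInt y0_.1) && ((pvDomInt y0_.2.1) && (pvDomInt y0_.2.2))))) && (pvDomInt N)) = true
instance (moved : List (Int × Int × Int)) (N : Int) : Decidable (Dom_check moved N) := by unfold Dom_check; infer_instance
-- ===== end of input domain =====

-- B repeatedly splits the pending marbles on the first marble's cell (survive iff alone, drop the
-- whole cell group), instead of A's N x N count grid plus a second scan; on marbles whose distinct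
-- coordinates alias under A's negative list indexing, B keeps the literally-alone marble (D_ below).


-- ===== PORT A =====
-- literal port of A: count = [[0]*N for _ in range(N)]; count[x][y] += 1 per marble;
-- keep marbles with count[x][y] == 1.  pyGetD/pySetD are the total forms of count[x][y],
-- exact under Pre_check (all coordinates in [-N, N), where Python indexing returns).
def check (moved : List (Int × Int × Int)) (N : Int) : List (Int × Int × Int) :=
  let count0 : List (List Int) := List.replicate N.toNat (List.replicate N.toNat 0)
  let count := moved.foldl (fun c m =>
      PySem.List.pySetD c m.1
        (PySem.List.pySetD (PySem.List.pyGetD c m.1 []) m.2.1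
          (PySem.List.pyGetD (PySem.List.pyGetD c m.1 []) m.2.1 0 + 1))) count0
  moved.foldl (fun acc m =>
      if PySem.List.pyGetD (PySem.List.pyGetD count m.1 []) m.2.1 0 == 1
      then acc ++ [m] else acc) []

-- ===== PORT B =====
-- literal port of B: one pass over the pending list splits the rest on the head's cell
-- (pvPart = B's inner for-loop computing `alone` and `others`); the while loop is pvCollide.
def pvPart (c : Int × Int) (rest : List (Int × Int × Int)) : Bool × List (Int × Int × Int) :=
  rest.foldl (fun st m => if (m.1, m.2.1) == c then (false, st.2) else (st.1, st.2 ++ [m]))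
    (true, [])

-- termination measure for pvCollide: the inner loop only ever drops marbles
lemma pvPart_len_go (c : Int × Int) (rest : List (Int × Int × Int)) :
    ∀ (b : Bool) (os : List (Int × Int × Int)),
    (rest.foldl (fun st m => if (m.1, m.2.1) == c then (false, st.2) else (st.1, st.2 ++ [m]))
      (b, os)).2.length ≤ os.length + rest.length := by
  induction rest with
  | nil => intro b os; simp
  | cons m t ih =>
    intro b os
    rw [List.foldl_cons]
    by_cases h : ((m.1, m.2.1) == c) = true
    · rw [if_pos h]
      exact le_trans (ih false os) (by simp only [List.length_cons]; omega)
    · rw [if_neg h]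
      exact le_trans (ih b (os ++ [m]))
        (by simp only [List.length_append, List.length_cons, List.length_nil]; omega)

lemma pvPart_len (c : Int × Int) (rest : List (Int × Int × Int)) :
    (pvPart c rest).2.length ≤ rest.length := by
  have h := pvPart_len_go c rest true []
  simp only [List.length_nil, Nat.zero_add] at h
  exact h

def pvCollide (acc : List (Int × Int × Int)) (pending : List (Int × Int × Int)) :
    List (Int × Int × Int) :=
  match pending with
  | [] => acc
  | m :: rest =>
    let st := pvPart (m.1, m.2.1) rest
    pvCollide (if st.1 then acc ++ [m] else acc) st.2
termination_by pending.length
decreasing_by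
  simp only [List.length_cons]
  exact Nat.lt_succ_of_le (pvPart_len _ _)

def check_alt (moved : List (Int × Int × Int)) (N : Int) : List (Int × Int × Int) :=
  pvCollide [] moved

-- ===== PRECONDITION & SPEC =====
-- Pre_check is exactly the domain on which A returns: every coordinate in [-N, N)
-- (outside it count[x][y] raises IndexError).
def Pre_check (moved : List (Int × Int × Int)) (N : Int) : Prop :=
  ∀ m ∈ moved, -N ≤ m.1 ∧ m.1 < N ∧ -N ≤ m.2.1 ∧ m.2.1 < N
instance (moved : List (Int × Int × Int)) (N : Int) : Decidable (Pre_check moved N) := by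
  unfold Pre_check; infer_instance

def pvWitness_check : (List (Int × Int × Int)) × Int := ([(0, 0, 1), (1, 1, 2), (0, 0, 3)], 2)

-- On inputs where some marble is alone at its literal coordinates but a marble with different
-- coordinates lands on the same count-grid cell (coordinates congruent mod N via Python's
-- negative list indexing), A drops that marble while B keeps it; coordinates are cell labels,
-- so B's literal-cell reading is the intended one.
def D_check (moved : List (Int × Int × Int)) (N : Int) : Prop :=
  ∃ m ∈ moved,
    moved.countP (fun b => decide (b.1 = m.1 ∧ b.2.1 = m.2.1)) = 1 ∧
    2 ≤ moved.countP (fun b => decide (b.1 ≡ m.1 [ZMOD N] ∧ b.2.1 ≡ m.2.1 [ZMOD N]))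
instance (moved : List (Int × Int × Int)) (N : Int) : Decidable (D_check moved N) := by
  unfold D_check; infer_instance

def Spec_check (moved : List (Int × Int × Int)) (N : Int) (out : List (Int × Int × Int)) : Prop :=
  ¬ D_check moved N → out = check_alt moved N
instance (moved : List (Int × Int × Int)) (N : Int) (out : List (Int × Int × Int)) :
    Decidable (Spec_check moved N out) := by unfold Spec_check; infer_instance

def pvDiffWitness_check : (List (Int × Int × Int)) × Int := ([(-1, 0, 1), (1, 0, 2)], 2)
def pvDiffWitnessOut_check : (List (Int × Int × Int)) × (List (Int × Int × Int)) :=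
  ([], [(-1, 0, 1), (1, 0, 2)])

-- ===== CLAIM (what is proved, stated in full; the proofs are below) =====
def Claim_unchanged_check : Prop := ∀ (moved : List (Int × Int × Int)) (N : Int),
  Dom_check moved N → Pre_check moved N → Spec_check moved N (check moved N)
def Claim_changed_check : Prop :=
  Dom_check (pvDiffWitness_check.1) (pvDiffWitness_check.2) ∧
  Pre_check (pvDiffWitness_check.1) (pvDiffWitness_check.2) ∧
  D_check (pvDiffWitness_check.1) (pvDiffWitness_check.2) ∧
  check (pvDiffWitness_check.1) (pvDiffWitness_check.2) = pvDiffWitnessOut_check.1 ∧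
  check_alt (pvDiffWitness_check.1) (pvDiffWitness_check.2) = pvDiffWitnessOut_check.2 ∧
  pvDiffWitnessOut_check.1 ≠ pvDiffWitnessOut_check.2
def Claim_exact_check : Prop := ∀ (moved : List (Int × Int × Int)) (N : Int),
  Dom_check moved N → Pre_check moved N → D_check moved N →
  check moved N ≠ check_alt moved N

-- ===== LEMMAS AND PROOFS =====

-- ---- B side: closed form of the partition loop ----
def pvM (c : Int × Int) (b : Int × Int × Int) : Bool := (b.1, b.2.1) == c
def pvNoM (c : Int × Int) (b : Int × Int × Int) : Bool := !((b.1, b.2.1) == c)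

lemma pvPart_eq (c : Int × Int) (rest : List (Int × Int × Int)) :
    pvPart c rest = (rest.all (pvNoM c), rest.filter (pvNoM c)) := by
  suffices go : ∀ (l : List (Int × Int × Int)) (b : Bool) (os : List (Int × Int × Int)),
      (l.foldl (fun st m => if (m.1, m.2.1) == c then (false, st.2) else (st.1, st.2 ++ [m]))
        (b, os)) = (b && l.all (pvNoM c), os ++ l.filter (pvNoM c)) by
    have h := go rest true []
    simp only [Bool.true_and, List.nil_append] at h
    exact h
  intro l
  induction l with
  | nil => intro b os; simp
  | cons m t ih =>
    intro b os
    rw [List.foldl_cons]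
    by_cases h : ((m.1, m.2.1) == c) = true
    · rw [if_pos h]
      exact (ih false os).trans (by simp [List.all_cons, List.filter_cons, pvNoM, h])
    · rw [if_neg h]
      exact (ih b (os ++ [m])).trans
        (by simp [List.all_cons, List.filter_cons, pvNoM, h, Bool.not_eq_true] <;> simp_all)

def pvF (l : List (Int × Int × Int)) : List (Int × Int × Int) :=
  l.filter (fun a => (l.filter (pvM (a.1, a.2.1))).length == 1)

lemma pvF_cons (m : Int × Int × Int) (rest : List (Int × Int × Int)) :
    pvF (m :: rest)
      = (if rest.all (pvNoM (m.1, m.2.1)) then [m] else [])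
        ++ pvF (rest.filter (pvNoM (m.1, m.2.1))) := by
  have hself : pvM (m.1, m.2.1) m = true := by simp [pvM]
  -- pointwise: the survival predicate over m :: rest, restricted to rest, is
  -- pvNoM (cell m) && the survival predicate over the filtered rest
  have hpoint : ∀ a ∈ rest,
      (((m :: rest).filter (pvM (a.1, a.2.1))).length == 1)
        = (pvNoM (m.1, m.2.1) a &&
            (((rest.filter (pvNoM (m.1, m.2.1))).filter (pvM (a.1, a.2.1))).length == 1)) := by
    intro a ha
    cases hac : ((a.1, a.2.1) == (m.1, m.2.1)) with
    | true =>
      -- a shares m's cell: the group contains both m and a, so never a singleton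
      have hac' : (a.1, a.2.1) = (m.1, m.2.1) := by simpa using hac
      have hmem : a ∈ rest.filter (pvM (a.1, a.2.1)) :=
        List.mem_filter.mpr ⟨ha, by simp [pvM]⟩
      have hpos : 0 < (rest.filter (pvM (a.1, a.2.1))).length :=
        List.length_pos_of_mem hmem
      have hhead : pvM (a.1, a.2.1) m = true := by
        simp [pvM, ← hac']
      rw [List.filter_cons_of_pos hhead]
      have hno : pvNoM (m.1, m.2.1) a = false := by simp [pvNoM, hac]
      rw [hno, Bool.false_and]
      apply Bool.eq_false_iff.mpr
      simp only [ne_eq, List.length_cons, beq_iff_eq]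
      omega
    | false =>
      -- a is in another cell: m drops out, and marbles of m's cell never match a
      have hhead : pvM (a.1, a.2.1) m = false := by
        simp only [pvM, beq_eq_false_iff_ne, ne_eq] at hac ⊢
        exact fun h => hac h.symm
      rw [List.filter_cons_of_neg (by simp [hhead])]
      have hsame : rest.filter (pvM (a.1, a.2.1))
          = (rest.filter (pvNoM (m.1, m.2.1))).filter (pvM (a.1, a.2.1)) := by
        rw [List.filter_filter]
        apply List.filter_congr
        intro b _
        cases hb : pvM (a.1, a.2.1) b with
        | false => simp [hb]
        | true =>
          have hb' : (b.1, b.2.1) = (a.1, a.2.1) := by simpa [pvM] using hb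
          have : pvNoM (m.1, m.2.1) b = true := by
            simp only [pvNoM, hb']
            simpa using hac
          simp [hb, this]
      rw [← hsame]
      simp [pvNoM, hac]
  have hallnil : rest.all (pvNoM (m.1, m.2.1))
      = decide (rest.filter (pvM (m.1, m.2.1)) = []) := by
    apply Bool.eq_iff_iff.mpr
    simp [List.all_eq_true, List.filter_eq_nil_iff, pvNoM, pvM]
  have hhead : (((m :: rest).filter (pvM (m.1, m.2.1))).length == 1)
      = rest.all (pvNoM (m.1, m.2.1)) := by
    rw [List.filter_cons_of_pos hself, hallnil]
    apply Bool.eq_iff_iff.mpr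
    simp only [List.length_cons, beq_iff_eq, decide_eq_true_eq]
    constructor
    · intro h
      exact List.eq_nil_of_length_eq_zero (by omega)
    · intro h
      rw [h]
      simp
  unfold pvF
  rw [List.filter_cons, hhead, List.filter_congr hpoint,
    List.filter_congr (fun a (_ : a ∈ rest) => Bool.and_comm (pvNoM (m.1, m.2.1) a)
      (((rest.filter (pvNoM (m.1, m.2.1))).filter (pvM (a.1, a.2.1))).length == 1)),
    ← List.filter_filter]
  cases hall : rest.all (pvNoM (m.1, m.2.1)) <;> simp

lemma pvCollide_closed (fuel : Nat) :
    ∀ (pending acc : List (Int × Int × Int)), pending.length ≤ fuel →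
    pvCollide acc pending = acc ++ pvF pending := by
  induction fuel with
  | zero =>
    intro pending acc h
    have : pending = [] := List.eq_nil_of_length_eq_zero (Nat.le_zero.mp h)
    subst this
    simp [pvCollide, pvF]
  | succ f ih =>
    intro pending acc h
    match pending with
    | [] => simp [pvCollide, pvF]
    | m :: rest =>
      rw [pvCollide, pvPart_eq]
      have hlen : (rest.filter (pvNoM (m.1, m.2.1))).length ≤ f :=
        Nat.le_trans (List.length_filter_le _ _) (by simpa using h)
      rw [ih _ _ hlen, pvF_cons]
      cases hall : rest.all (pvNoM (m.1, m.2.1)) <;> simp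

lemma pvB_closed (moved : List (Int × Int × Int)) (N : Int) :
    check_alt moved N = pvF moved := by
  unfold check_alt
  simpa using pvCollide_closed moved.length moved [] le_rfl

-- ===== A's side: the count matrix holds, at each wrapped cell, the number of marbles there =====
def pvStep (c : List (List Int)) (m : Int × Int × Int) : List (List Int) :=
  PySem.List.pySetD c m.1
    (PySem.List.pySetD (PySem.List.pyGetD c m.1 []) m.2.1
      (PySem.List.pyGetD (PySem.List.pyGetD c m.1 []) m.2.1 0 + 1))

-- the list index Python resolves x to (negative indices count from the end)
def pvIdx (n : Nat) (x : Int) : Nat := (if x < 0 then x + n else x).toNat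

lemma pvIdx_lt (n : Nat) (x : Int) (h1 : -(n : Int) ≤ x) (h2 : x < (n : Int)) :
    pvIdx n x < n := by
  unfold pvIdx; split <;> omega

lemma pySetD_inrange {α : Type} (xs : List α) (i : Int) (v : α)
    (h1 : -(xs.length : Int) ≤ i) (h2 : i < (xs.length : Int)) :
    PySem.List.pySetD xs i v = xs.set (pvIdx xs.length i) v := by
  unfold PySem.List.pySetD PySem.List.pySet? PySem.List.pyIdx? pvIdx
  by_cases h : 0 ≤ i
  · rw [if_pos h, if_pos h2, if_neg (by omega)]
    simp
  · rw [if_neg h, if_pos h1, if_pos (by omega)]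
    simp
    congr 1
    omega

lemma pyGetD_inrange {α : Type} (xs : List α) (i : Int) (d : α)
    (h1 : -(xs.length : Int) ≤ i) (h2 : i < (xs.length : Int)) :
    PySem.List.pyGetD xs i d = xs.getD (pvIdx xs.length i) d := by
  unfold PySem.List.pyGetD PySem.List.pyGet? PySem.List.pyIdx? pvIdx
  by_cases h : 0 ≤ i
  · rw [if_pos h, if_pos h2, if_neg (by omega), List.getD_eq_getElem?_getD]
    simp
  · rw [if_neg h, if_pos h1, if_pos (by omega), List.getD_eq_getElem?_getD,
      show xs.length - (-i).toNat = (i + (xs.length : Int)).toNat by omega]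
    simp

lemma pvGetD_set {α : Type} (l : List α) (i j : Nat) (v d : α) :
    (l.set i v).getD j d = if i = j ∧ i < l.length then v else l.getD j d := by
  rw [List.getD_eq_getElem?_getD, List.getElem?_set]
  by_cases h : i = j
  · subst h
    by_cases h2 : i < l.length <;> simp [h2, List.getD_eq_getElem?_getD]
  · simp [h, List.getD_eq_getElem?_getD]

lemma pvStep_eq (n : Nat) (c : List (List Int)) (m : Int × Int × Int)
    (hc : c.length = n) (hr : ∀ r ∈ c, r.length = n)
    (hm : -(n : Int) ≤ m.1 ∧ m.1 < (n : Int) ∧ -(n : Int) ≤ m.2.1 ∧ m.2.1 < (n : Int)) :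
    pvStep c m = c.set (pvIdx n m.1) ((c.getD (pvIdx n m.1) []).set (pvIdx n m.2.1)
      ((c.getD (pvIdx n m.1) []).getD (pvIdx n m.2.1) 0 + 1)) := by
  obtain ⟨hm1, hm2, hm3, hm4⟩ := hm
  have hrowlen : (c.getD (pvIdx n m.1) []).length = n := by
    rw [List.getD_eq_getElem c [] (by rw [hc]; exact pvIdx_lt n m.1 hm1 hm2)]
    exact hr _ (List.getElem_mem _)
  unfold pvStep
  rw [pyGetD_inrange c m.1 [] (by rw [hc]; exact hm1) (by rw [hc]; exact hm2), hc,
    pySetD_inrange _ m.2.1 _ (by rw [hrowlen]; exact hm3) (by rw [hrowlen]; exact hm4),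
    hrowlen,
    pyGetD_inrange _ m.2.1 0 (by rw [hrowlen]; exact hm3) (by rw [hrowlen]; exact hm4),
    hrowlen,
    pySetD_inrange c m.1 _ (by rw [hc]; exact hm1) (by rw [hc]; exact hm2), hc]

lemma pvStep_shape (n : Nat) (c : List (List Int)) (m : Int × Int × Int)
    (hc : c.length = n) (hr : ∀ r ∈ c, r.length = n)
    (hm : -(n : Int) ≤ m.1 ∧ m.1 < (n : Int) ∧ -(n : Int) ≤ m.2.1 ∧ m.2.1 < (n : Int)) :
    (pvStep c m).length = n ∧ (∀ r ∈ pvStep c m, r.length = n) := by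
  rw [pvStep_eq n c m hc hr hm]
  constructor
  · simpa using hc
  · intro r hrm
    rcases List.mem_or_eq_of_mem_set hrm with h | h
    · exact hr r h
    · subst h
      rw [List.length_set, List.getD_eq_getElem c [] (by rw [hc]; exact pvIdx_lt n m.1 hm.1 hm.2.1)]
      exact hr _ (List.getElem_mem _)

lemma pvStep_get (n : Nat) (c : List (List Int)) (m : Int × Int × Int) (x y : Int)
    (hc : c.length = n) (hr : ∀ r ∈ c, r.length = n)
    (hm : -(n : Int) ≤ m.1 ∧ m.1 < (n : Int) ∧ -(n : Int) ≤ m.2.1 ∧ m.2.1 < (n : Int))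
    (_hx1 : -(n : Int) ≤ x) (_hx2 : x < (n : Int)) (_hy1 : -(n : Int) ≤ y) (_hy2 : y < (n : Int)) :
    ((pvStep c m).getD (pvIdx n x) []).getD (pvIdx n y) 0
      = (c.getD (pvIdx n x) []).getD (pvIdx n y) 0
        + (if pvIdx n m.1 = pvIdx n x ∧ pvIdx n m.2.1 = pvIdx n y then 1 else 0) := by
  obtain ⟨hm1, hm2, hm3, hm4⟩ := hm
  have hrowlen : (c.getD (pvIdx n m.1) []).length = n := by
    rw [List.getD_eq_getElem c [] (by rw [hc]; exact pvIdx_lt n m.1 hm1 hm2)]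
    exact hr _ (List.getElem_mem _)
  rw [pvStep_eq n c m hc hr ⟨hm1, hm2, hm3, hm4⟩, pvGetD_set]
  by_cases hxe : pvIdx n m.1 = pvIdx n x
  · rw [if_pos ⟨hxe, by rw [hc]; exact pvIdx_lt n m.1 hm1 hm2⟩, pvGetD_set]
    by_cases hye : pvIdx n m.2.1 = pvIdx n y
    · rw [if_pos ⟨hye, by rw [hrowlen]; exact pvIdx_lt n m.2.1 hm3 hm4⟩,
        if_pos ⟨hxe, hye⟩, hxe, hye]
    · rw [if_neg (fun hh => hye hh.1), if_neg (fun hh => hye hh.2), hxe]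
      simp
  · rw [if_neg (fun hh => hxe hh.1), if_neg (fun hh => hxe hh.1)]
    simp

lemma pvCount (n : Nat) :
    ∀ (t : List (Int × Int × Int)) (c : List (List Int)),
    c.length = n → (∀ r ∈ c, r.length = n) →
    (∀ m ∈ t, -(n : Int) ≤ m.1 ∧ m.1 < (n : Int) ∧ -(n : Int) ≤ m.2.1 ∧ m.2.1 < (n : Int)) →
    (t.foldl pvStep c).length = n ∧ (∀ r ∈ t.foldl pvStep c, r.length = n) ∧
    (∀ x y : Int, -(n : Int) ≤ x → x < (n : Int) → -(n : Int) ≤ y → y < (n : Int) →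
      ((t.foldl pvStep c).getD (pvIdx n x) []).getD (pvIdx n y) 0
        = (c.getD (pvIdx n x) []).getD (pvIdx n y) 0
          + ((t.filter (fun m =>
              decide (pvIdx n m.1 = pvIdx n x ∧ pvIdx n m.2.1 = pvIdx n y))).length : Int)) := by
  intro t
  induction t with
  | nil =>
    intro c h1 h2 _
    refine ⟨h1, h2, fun x y _ _ _ _ => ?_⟩
    simp
  | cons m t ih =>
    intro c h1 h2 h3
    have hm := h3 m (by simp)
    have hshape := pvStep_shape n c m h1 h2 hm
    have hrec := ih (pvStep c m) hshape.1 hshape.2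
      (fun m' hm' => h3 m' (by simp [hm']))
    rw [List.foldl_cons]
    refine ⟨hrec.1, hrec.2.1, fun x y hx1 hx2 hy1 hy2 => ?_⟩
    rw [hrec.2.2 x y hx1 hx2 hy1 hy2, pvStep_get n c m x y h1 h2 hm hx1 hx2 hy1 hy2,
      List.filter_cons]
    by_cases hc' : pvIdx n m.1 = pvIdx n x ∧ pvIdx n m.2.1 = pvIdx n y
    · rw [if_pos hc', if_pos (by simpa using hc')]
      simp
      ring
    · rw [if_neg hc', if_neg (by simpa using hc')]
      ring

lemma pvA_closed (moved : List (Int × Int × Int)) (N : Int) (hpre : Pre_check moved N) :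
    check moved N = moved.filter (fun m =>
      ((moved.filter (fun m' => decide (pvIdx N.toNat m'.1 = pvIdx N.toNat m.1 ∧
        pvIdx N.toNat m'.2.1 = pvIdx N.toNat m.2.1))).length == 1)) := by
  have hN : ∀ m ∈ moved, -(N.toNat : Int) ≤ m.1 ∧ m.1 < (N.toNat : Int) ∧
      -(N.toNat : Int) ≤ m.2.1 ∧ m.2.1 < (N.toNat : Int) := by
    intro m hm
    have := hpre m hm
    omega
  have hcount := pvCount N.toNat moved
    (List.replicate N.toNat (List.replicate N.toNat (0 : Int)))
    (by simp) (by intro r hr; rw [List.eq_of_mem_replicate hr]; simp) hN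
  have h0 : ∀ i j : Nat,
      ((List.replicate N.toNat (List.replicate N.toNat (0 : Int))).getD i []).getD j 0 = 0 := by
    intro i j
    simp only [List.getD_eq_getElem?_getD, List.getElem?_replicate]
    by_cases h1 : i < N.toNat <;> by_cases h2 : j < N.toNat <;> simp [h1, h2]
  have hcast : ∀ k : Nat, ((k : Int) == (1 : Int)) = (k == 1) := by
    intro k
    by_cases hk : k = 1 <;> simp [hk]
  have key : ∀ count : List (List Int),
      count = moved.foldl pvStep (List.replicate N.toNat (List.replicate N.toNat 0)) →
      moved.foldl (fun acc m =>
        if PySem.List.pyGetD (PySem.List.pyGetD count m.1 []) m.2.1 0 == 1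
        then acc ++ [m] else acc) []
      = moved.filter (fun m =>
          ((moved.filter (fun m' => decide (pvIdx N.toNat m'.1 = pvIdx N.toNat m.1 ∧
            pvIdx N.toNat m'.2.1 = pvIdx N.toNat m.2.1))).length == 1)) := by
    intro count hcnt
    rw [PySem.List.foldl_append_if_eq_filter
      (fun m => PySem.List.pyGetD (PySem.List.pyGetD count m.1 []) m.2.1 0 == 1) moved [],
      List.nil_append]
    apply List.filter_congr
    intro m hm
    have hb := hN m hm
    have hrowlen : (count.getD (pvIdx N.toNat m.1) []).length = N.toNat := by
      rw [hcnt, List.getD_eq_getElem _ []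
        (by rw [hcount.1]; exact pvIdx_lt N.toNat m.1 hb.1 hb.2.1)]
      exact hcount.2.1 _ (List.getElem_mem _)
    rw [pyGetD_inrange count m.1 []
        (by rw [hcnt, hcount.1]; exact hb.1) (by rw [hcnt, hcount.1]; exact hb.2.1)]
    rw [show count.length = N.toNat by rw [hcnt]; exact hcount.1]
    rw [pyGetD_inrange _ m.2.1 0
        (by rw [hrowlen]; exact hb.2.2.1) (by rw [hrowlen]; exact hb.2.2.2)]
    rw [hrowlen, hcnt,
      hcount.2.2 m.1 m.2.1 hb.1 hb.2.1 hb.2.2.1 hb.2.2.2, h0, zero_add]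
    exact hcast _
  exact key _ rfl

-- ---- the congruence between A's wrapped grid cell and coordinate arithmetic ----
lemma pvIdx_emod (N x : Int) (h1 : -N ≤ x) (h2 : x < N) :
    ((pvIdx N.toNat x : Nat) : Int) = x % N := by
  have hN : 0 < N := by omega
  unfold pvIdx
  by_cases hx : x < 0
  · rw [if_pos hx]
    have hmod : x % N = x + N := by
      have h2' : (x + N) % N = x % N := Int.add_emod_right x N
      have h' : (x + N) % N = x + N := Int.emod_eq_of_lt (by omega) (by omega)
      omega
    omega
  · rw [if_neg hx]
    rw [Int.emod_eq_of_lt (by omega) h2]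
    omega

lemma pvIdx_eq_iff (N u v : Int) (hu1 : -N ≤ u) (hu2 : u < N) (hv1 : -N ≤ v) (hv2 : v < N) :
    (pvIdx N.toNat u = pvIdx N.toNat v) ↔ u ≡ v [ZMOD N] := by
  have h : (u ≡ v [ZMOD N]) ↔ u % N = v % N := Iff.rfl
  rw [h, ← pvIdx_emod N u hu1 hu2, ← pvIdx_emod N v hv1 hv2]
  exact ⟨fun hh => by rw [hh], fun hh => by exact_mod_cast hh⟩

-- filter-length monotonicity along a pointwise implication on members
lemma pvFilter_le {α : Type} (l : List α) (p q : α → Bool)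
    (h : ∀ a ∈ l, p a = true → q a = true) :
    (l.filter p).length ≤ (l.filter q).length := by
  induction l with
  | nil => simp
  | cons a t ih =>
    have ih' := ih (fun b hb => h b (by simp [hb]))
    rw [List.filter_cons, List.filter_cons]
    cases hp : p a with
    | true =>
      rw [h a (by simp) hp]
      simpa using ih'
    | false =>
      cases hq : q a with
      | true => simp; omega
      | false => simpa using ih'

-- under Pre_, D_'s two per-marble counts are exactly B's raw-cell group size and A's
-- wrapped-cell group size
lemma pvRawPred (m b : Int × Int × Int) :
    pvM (m.1, m.2.1) b = decide (b.1 = m.1 ∧ b.2.1 = m.2.1) := by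
  apply Bool.eq_iff_iff.mpr
  simp [pvM, Prod.ext_iff]

lemma pvWrapPred (moved : List (Int × Int × Int)) (N : Int) (hpre : Pre_check moved N)
    (m : Int × Int × Int) (hm : m ∈ moved) (b : Int × Int × Int) (hb : b ∈ moved) :
    decide (pvIdx N.toNat b.1 = pvIdx N.toNat m.1 ∧ pvIdx N.toNat b.2.1 = pvIdx N.toNat m.2.1)
      = decide (b.1 ≡ m.1 [ZMOD N] ∧ b.2.1 ≡ m.2.1 [ZMOD N]) := by
  have hbm := hpre m hm
  have hbb := hpre b hb
  apply decide_eq_decide.mpr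
  rw [pvIdx_eq_iff N b.1 m.1 hbb.1 hbb.2.1 hbm.1 hbm.2.1,
    pvIdx_eq_iff N b.2.1 m.2.1 hbb.2.2.1 hbb.2.2.2 hbm.2.2.1 hbm.2.2.2]

-- per-marble bridge: raw group size (B / D_) and wrapped group size (A / D_) as filter lengths
lemma pvCounts (moved : List (Int × Int × Int)) (N : Int) (hpre : Pre_check moved N)
    (m : Int × Int × Int) (hm : m ∈ moved) :
    moved.countP (fun b => decide (b.1 = m.1 ∧ b.2.1 = m.2.1))
        = (moved.filter (pvM (m.1, m.2.1))).length ∧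
    moved.countP (fun b => decide (b.1 ≡ m.1 [ZMOD N] ∧ b.2.1 ≡ m.2.1 [ZMOD N]))
        = (moved.filter (fun m' => decide (pvIdx N.toNat m'.1 = pvIdx N.toNat m.1 ∧
            pvIdx N.toNat m'.2.1 = pvIdx N.toNat m.2.1))).length ∧
    1 ≤ (moved.filter (pvM (m.1, m.2.1))).length ∧
    (moved.filter (pvM (m.1, m.2.1))).length
        ≤ (moved.filter (fun m' => decide (pvIdx N.toNat m'.1 = pvIdx N.toNat m.1 ∧
            pvIdx N.toNat m'.2.1 = pvIdx N.toNat m.2.1))).length := by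
  refine ⟨?_, ?_, ?_, ?_⟩
  · rw [List.countP_eq_length_filter, List.filter_congr (fun b _ => (pvRawPred m b).symm)]
  · rw [List.countP_eq_length_filter,
      List.filter_congr (fun b hb => (pvWrapPred moved N hpre m hm b hb).symm)]
  · exact List.length_pos_of_mem (List.mem_filter.mpr ⟨hm, by simp [pvM]⟩)
  · apply pvFilter_le
    intro b _ hbp
    have hb' : (b.1, b.2.1) = (m.1, m.2.1) := by simpa [pvM] using hbp
    have h12 : b.1 = m.1 ∧ b.2.1 = m.2.1 := by simpa [Prod.ext_iff] using hb'
    simp [h12.1, h12.2]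

-- ===== VERDICT (by name: the statements are the Claim_ definitions above) =====
theorem check_spec : Claim_unchanged_check := by
  intro moved N _ hpre
  unfold Spec_check
  intro hnd
  rw [pvA_closed moved N hpre, pvB_closed]
  unfold pvF
  apply List.filter_congr
  intro m hm
  obtain ⟨hraw, hwrap, hge1, hle⟩ := pvCounts moved N hpre m hm
  have hnd' : ¬ (moved.countP (fun b => decide (b.1 = m.1 ∧ b.2.1 = m.2.1)) = 1 ∧
      2 ≤ moved.countP (fun b => decide (b.1 ≡ m.1 [ZMOD N] ∧ b.2.1 ≡ m.2.1 [ZMOD N]))) := by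
    intro hcon
    exact hnd ⟨m, hm, hcon⟩
  rw [hraw, hwrap] at hnd'
  apply Bool.eq_iff_iff.mpr
  simp only [beq_iff_eq]
  constructor
  · intro hw
    omega
  · intro hr
    by_contra hw
    exact hnd' ⟨hr, by omega⟩

theorem check_changed : Claim_changed_check := by
  unfold Claim_changed_check
  refine ⟨by decide, by decide, by decide, by decide, ?_, by decide⟩
  rw [pvB_closed]
  decide

theorem check_tight : Claim_exact_check := by
  intro moved N _ hpre hd heq
  obtain ⟨m, hm, h1, h2⟩ := hd
  obtain ⟨hraw, hwrap, hge1, hle⟩ := pvCounts moved N hpre m hm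
  have hB : m ∈ check_alt moved N := by
    rw [pvB_closed]
    apply List.mem_filter.mpr
    refine ⟨hm, ?_⟩
    simp only [beq_iff_eq]
    omega
  rw [← heq, pvA_closed moved N hpre] at hB
  have hA := (List.mem_filter.mp hB).2
  simp only [beq_iff_eq] at hA
  omega
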